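-- pv_equiv track=rewrite | github.com/h0bib/sigmorph | src/sigmorph/generalize.py | _common_contains
-- ===== SOURCE A (Python) =====
-- def _common_contains(values: list[str]) -> list[str]:
--     tokens = []
--     interesting = [
--         "-enc",
--         "EncodedCommand",
--         "powershell",
--         "cmd.exe",
--         "rundll32",
--         "mshta",
--         "wscript",
--     ]
--     joined = " || ".join(v.lower() for v in values)
--     for token in interesting:
--         if token.lower() in joined:
--             tokens.append(token)
--     return tokens
-- ===== SOURCE B (Python) =====
-- def _common_contains(values: list[str]) -> list[str]:
--     lowered = [v.lower() for v in values]
--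
--     def hit(token: str) -> bool:
--         tl = token.lower()
--         return any(tl in v for v in lowered)
--
--     return list(filter(hit, [
--         "-enc",
--         "EncodedCommand",
--         "powershell",
--         "cmd.exe",
--         "rundll32",
--         "mshta",
--         "wscript",
--     ]))
-- ===== Notes on version B (the rewrite author's own statement) =====
-- stated objective: simpler
-- what changed: B drops A's ' || '.join-then-scan and its accumulator loop entirely: it lowercases the values once, defines a predicate 'token occurs in some value', and returns filter(hit, tokens) with any() over the values, instead of building one joined string and appending hits to a list.
import Mathlib
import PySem

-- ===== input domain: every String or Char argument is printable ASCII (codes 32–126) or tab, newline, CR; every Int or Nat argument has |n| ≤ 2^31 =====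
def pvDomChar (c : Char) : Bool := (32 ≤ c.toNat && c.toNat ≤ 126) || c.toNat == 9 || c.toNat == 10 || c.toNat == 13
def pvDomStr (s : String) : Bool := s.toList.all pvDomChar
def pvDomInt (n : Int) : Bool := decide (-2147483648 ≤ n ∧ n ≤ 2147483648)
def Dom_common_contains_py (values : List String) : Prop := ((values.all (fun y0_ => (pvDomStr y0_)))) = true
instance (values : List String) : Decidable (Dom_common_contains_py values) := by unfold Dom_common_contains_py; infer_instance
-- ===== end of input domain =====

-- B drops A's " || ".join-then-scan and the accumulator loop: it lowercases the
-- values once and returns a filter of the token list by an any-over-values predicate.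

-- ===== PORT A =====
def common_contains_py (values : List String) : List String :=
  let tokens : List String := []
  let interesting : List String :=
    ["-enc", "EncodedCommand", "powershell", "cmd.exe", "rundll32", "mshta", "wscript"]
  let joined : String := PySem.Str.join " || " (values.map (fun v => PySem.Str.lower v))
  interesting.foldl
    (fun tokens token =>
      if PySem.Str.isIn (PySem.Str.lower token) joined then tokens ++ [token] else tokens)
    tokens

-- ===== PORT B =====
-- B's helper: does the token occur (case-insensitively) in some lowered value?
def ccHit (lowered : List String) (token : String) : Bool :=
  let tl := PySem.Str.lower token
  lowered.any (fun v => PySem.Str.isIn tl v)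

def common_contains_py_alt (values : List String) : List String :=
  let lowered : List String := values.map (fun v => PySem.Str.lower v)
  List.filter (ccHit lowered)
    ["-enc", "EncodedCommand", "powershell", "cmd.exe", "rundll32", "mshta", "wscript"]

-- ===== PRECONDITION & SPEC =====
def Spec_common_contains_py (values : List String) (out : List String) : Prop := out = common_contains_py_alt values
instance (values : List String) (out : List String) : Decidable (Spec_common_contains_py values out) := by unfold Spec_common_contains_py; infer_instance

-- ===== CLAIM (what is proved, stated in full; the proofs are below) =====
def Claim_equal_common_contains_py : Prop := ∀ (values : List String), Dom_common_contains_py values → Spec_common_contains_py values (common_contains_py values)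

-- ===== LEMMAS AND PROOFS =====

-- An infix that avoids the character c cannot cross an occurrence of c.
theorem pv_infix_split {α : Type} {t a b : List α} {c : α} (hc : c ∉ t) :
    t <:+: (a ++ c :: b) ↔ t <:+: a ∨ t <:+: b := by
  constructor
  · rintro ⟨s, u, hsu⟩
    by_cases hle : s.length + t.length ≤ a.length
    · left
      have hpref : s ++ t <+: a ++ c :: b := ⟨u, by simpa [List.append_assoc] using hsu⟩
      have ha : a <+: a ++ c :: b := List.prefix_append _ _
      have hpref2 : s ++ t <+: a :=
        List.prefix_of_prefix_length_le hpref ha (by simpa using hle)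
      obtain ⟨w, hw⟩ := hpref2
      exact ⟨s, w, by simpa [List.append_assoc] using hw⟩
    · by_cases hlt : a.length < s.length
      · right
        have hs : s <+: a ++ c :: b := ⟨t ++ u, by simpa [List.append_assoc] using hsu⟩
        have hac : a ++ [c] <+: a ++ c :: b := ⟨b, by simp⟩
        have h2 : a ++ [c] <+: s :=
          List.prefix_of_prefix_length_le hac hs (by simp; omega)
        obtain ⟨s', hs'⟩ := h2
        refine ⟨s', u, ?_⟩
        have : (a ++ [c]) ++ (s' ++ t ++ u) = (a ++ [c]) ++ b := by
          calc (a ++ [c]) ++ (s' ++ t ++ u) = ((a ++ [c]) ++ s') ++ t ++ u := by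
                simp [List.append_assoc]
            _ = s ++ t ++ u := by rw [hs']
            _ = a ++ c :: b := hsu
            _ = (a ++ [c]) ++ b := by simp
        exact List.append_cancel_left this
      · exfalso
        have hg := congrArg (fun l => l[a.length]?) hsu
        simp only at hg
        have hlhs : (s ++ t ++ u)[a.length]? = t[a.length - s.length]? := by
          rw [List.getElem?_append_left (by simp; omega),
              List.getElem?_append_right (by omega)]
        have hrhs : (a ++ c :: b)[a.length]? = some c := by
          rw [List.getElem?_append_right (by omega)]
          simp
        rw [hlhs, hrhs] at hg
        exact hc (List.mem_of_getElem? hg)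
  · rintro (⟨s, u, hsu⟩ | ⟨s, u, hsu⟩)
    · exact ⟨s, u ++ c :: b, by rw [← hsu]; simp [List.append_assoc]⟩
    · exact ⟨a ++ c :: s, u, by rw [← hsu]; simp [List.append_assoc]⟩

-- A space-free, pipe-free, nonempty token occurs in the " || "-joined string
-- iff it occurs in one of the pieces.
theorem pv_isIn_join (t : List Char) (hsp : ' ' ∉ t) (hbar : '|' ∉ t) (hne : t ≠ [])
    (parts : List (List Char)) :
    PySem.Chars.isIn t (PySem.Chars.join [' ', '|', '|', ' '] parts)
      = parts.any (fun p => PySem.Chars.isIn t p) := by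
  induction parts with
  | nil =>
    rw [PySem.Chars.join_nil]
    simp [PySem.Chars.isIn_eq_false_iff, hne]
  | cons p ps ih =>
    cases ps with
    | nil => rw [PySem.Chars.join_singleton]; simp
    | cons q ps' =>
      rw [PySem.Chars.join_cons_cons, List.any_cons, ← ih]
      have key : t <:+: (p ++ [' ', '|', '|', ' '] ++ PySem.Chars.join [' ', '|', '|', ' '] (q :: ps'))
          ↔ t <:+: p ∨ t <:+: PySem.Chars.join [' ', '|', '|', ' '] (q :: ps') := by
        have e : p ++ [' ', '|', '|', ' '] ++ PySem.Chars.join [' ', '|', '|', ' '] (q :: ps')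
            = p ++ ' ' :: (['|', '|'] ++ ' ' :: PySem.Chars.join [' ', '|', '|', ' '] (q :: ps')) := by
          simp
        have hmid : ¬ t <:+: ['|', '|'] := by
          intro h
          cases t with
          | nil => exact hne rfl
          | cons x xs =>
            have hx : x ∈ ['|', '|'] := h.subset (List.mem_cons_self)
            simp at hx
            subst hx
            exact hbar List.mem_cons_self
        rw [e, pv_infix_split hsp, pv_infix_split hsp]
        tauto
      rw [Bool.eq_iff_iff]
      simp only [PySem.Chars.isIn_iff_infix, Bool.or_eq_true]
      exact key

theorem common_contains_py_eq_alt (values : List String) :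
    common_contains_py values = common_contains_py_alt values := by
  unfold common_contains_py common_contains_py_alt
  simp only [PySem.List.foldl_append_if_eq_filter, List.nil_append]
  apply List.filter_congr
  intro x hx
  have hprops : ' ' ∉ (PySem.Str.lower x).toList ∧ '|' ∉ (PySem.Str.lower x).toList ∧
      (PySem.Str.lower x).toList ≠ [] := by
    fin_cases hx <;> decide
  unfold ccHit
  have hjoin : (PySem.Str.join " || " (values.map (fun v => PySem.Str.lower v))).toList
      = PySem.Chars.join [' ', '|', '|', ' '] (values.map (fun v => (PySem.Str.lower v).toList)) := by
    rw [PySem.Str.toList_join, List.map_map]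
    rfl
  rw [show PySem.Str.isIn (PySem.Str.lower x)
        (PySem.Str.join " || " (values.map (fun v => PySem.Str.lower v)))
      = PySem.Chars.isIn (PySem.Str.lower x).toList
        (PySem.Str.join " || " (values.map (fun v => PySem.Str.lower v))).toList from by simp,
      hjoin, pv_isIn_join _ hprops.1 hprops.2.1 hprops.2.2]
  simp only [List.any_map]
  congr 1

-- ===== VERDICT (by name: the statement is the Claim_ definition above) =====
theorem common_contains_py_spec : Claim_equal_common_contains_py := by
  intro values _
  unfold Spec_common_contains_py
  exact common_contains_py_eq_alt values
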